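-- pv_equiv track=rewrite | github.com/Tmzpanda/leetcode | kClosest.py | findUpperClosest
-- ===== SOURCE A (Python) =====
-- def findUpperClosest(A, target):
--     l, r = 0, len(A) - 1
--     while l + 1 < r:
--         mid = (l + r) // 2
--         if target == A[mid]:
--             return mid
--         elif target < A[mid]:
--             r = mid
--         else:
--             l = mid
--     return r
-- ===== SOURCE B (Python) =====
-- def findUpperClosest(A, target):
--     def go(sub):
--         n = len(sub)
--         if n <= 2:
--             return n - 1
--         m = (n - 1) // 2
--         v = sub[m]
--         if target == v:
--             return m
--         if target < v:
--             return go(sub[:m + 1])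
--         return m + go(sub[m:])
--     return go(A)
-- ===== Notes on version B (the rewrite author's own statement) =====
-- stated objective: alternative
-- what changed: A's iterative loop over mutable integer bounds l/r is replaced by recursion on list slices: the helper carries no indices at all, recurses on sub[:m+1] or sub[m:], and rebuilds the absolute index by adding the offset m on the way back up.
import Mathlib
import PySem

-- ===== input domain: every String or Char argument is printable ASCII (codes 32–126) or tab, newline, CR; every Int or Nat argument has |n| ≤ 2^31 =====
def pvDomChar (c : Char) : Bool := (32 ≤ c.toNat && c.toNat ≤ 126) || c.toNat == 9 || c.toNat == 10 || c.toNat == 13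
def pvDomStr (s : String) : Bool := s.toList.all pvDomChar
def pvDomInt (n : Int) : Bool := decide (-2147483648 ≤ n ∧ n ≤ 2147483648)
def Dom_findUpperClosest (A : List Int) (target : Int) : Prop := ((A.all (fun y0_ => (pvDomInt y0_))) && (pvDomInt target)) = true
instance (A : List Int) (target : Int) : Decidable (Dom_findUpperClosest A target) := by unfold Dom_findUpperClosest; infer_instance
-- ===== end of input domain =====

-- B replaces A's iterative binary-search loop over mutable integer bounds l/r by
-- recursion on list slices (no indices carried; absolute index rebuilt by adding offsets).


-- midpoint strictly between l and r once l + 1 < r (used by A's port for termination)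
theorem pvMidBounds (l r : Int) (h : l + 1 < r) :
    l < PySem.Int.floordiv (l + r) 2 ∧ PySem.Int.floordiv (l + r) 2 < r := by
  rw [PySem.Int.floordiv_eq_ediv_of_pos (by omega)]
  omega

-- relative midpoint m = (n-1)//2 of a window of length n ≥ 3 (used by B's port for termination)
theorem pvMBounds (n : Int) (h : 3 ≤ n) :
    1 ≤ PySem.Int.floordiv (n - 1) 2 ∧ PySem.Int.floordiv (n - 1) 2 + 1 < n := by
  rw [PySem.Int.floordiv_eq_ediv_of_pos (by omega)]
  omega

-- ===== PORT A =====
-- the while loop of A, state (l, r); A[mid] via pyGet? (in A's use mid is always in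
-- range, so the `none` IndexError branch is unreachable)
def pvLoopA (A : List Int) (target : Int) (l r : Int) : Int :=
  if h : l + 1 < r then
    let mid := PySem.Int.floordiv (l + r) 2
    match PySem.List.pyGet? A mid with
    | none => r
    | some am =>
      if target = am then mid
      else if target < am then pvLoopA A target l mid
      else pvLoopA A target mid r
  else r
termination_by (r - l).toNat
decreasing_by
  · have := pvMidBounds l r h; omega
  · have := pvMidBounds l r h; omega

def findUpperClosest (A : List Int) (target : Int) : Int :=
  pvLoopA A target 0 ((A.length : Int) - 1)

-- ===== PORT B =====
-- Source B's go(sub): recursion on slices; sub[m] via pyGet? (m is always in range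
-- when n ≥ 3, so the `none` IndexError branch is unreachable)
def pvGoB (target : Int) (sub : List Int) : Int :=
  let n : Int := sub.length
  if h : n ≤ 2 then n - 1
  else
    let m := PySem.Int.floordiv (n - 1) 2
    match PySem.List.pyGet? sub m with
    | none => n - 1
    | some v =>
      if target = v then m
      else if target < v then pvGoB target (PySem.List.slice sub none (some (m + 1)))
      else m + pvGoB target (PySem.List.slice sub (some m) none)
termination_by sub.length
decreasing_by
  · have hm := pvMBounds (sub.length : Int) (by omega)
    rw [PySem.List.slice_to sub (by omega)]
    simp only [List.length_take]
    omega
  · have hm := pvMBounds (sub.length : Int) (by omega)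
    rw [PySem.List.slice_from sub (by omega)]
    simp only [List.length_drop]
    omega

def findUpperClosest_alt (A : List Int) (target : Int) : Int :=
  pvGoB target A

-- ===== PRECONDITION & SPEC =====
def Spec_findUpperClosest (A : List Int) (target : Int) (out : Int) : Prop := out = findUpperClosest_alt A target
instance (A : List Int) (target : Int) (out : Int) : Decidable (Spec_findUpperClosest A target out) := by unfold Spec_findUpperClosest; infer_instance

-- ===== CLAIM (what is proved, stated in full; the proofs are below) =====
def Claim_equal_findUpperClosest : Prop := ∀ (A : List Int) (target : Int), Dom_findUpperClosest A target → Spec_findUpperClosest A target (findUpperClosest A target)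

-- ===== LEMMAS AND PROOFS =====

-- A's loop on window (l, r) equals l plus B's recursion on the slice A[l : r+1]
theorem pvLoop_eq_go (A : List Int) (target : Int) :
    ∀ (fuel : Nat) (l r : Int), 0 ≤ l → l ≤ r + 1 → r < (A.length : Int) →
      (r - l).toNat ≤ fuel →
      pvLoopA A target l r = l + pvGoB target ((A.drop l.toNat).take (r + 1 - l).toNat) :=
  by
  intro fuel
  induction fuel with
  | zero =>
    intro l r hl hlr hr hfuel
    rw [pvLoopA, pvGoB]
    have hlen : (((A.drop l.toNat).take (r + 1 - l).toNat).length : Int) = r + 1 - l := by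
      simp only [List.length_take, List.length_drop]
      omega
    have h1 : ¬ (l + 1 < r) := by omega
    have h2 : (((A.drop l.toNat).take (r + 1 - l).toNat).length : Int) ≤ 2 := by omega
    simp only [h1, dite_false, h2, dite_true]
    omega
  | succ fuel ih =>
    intro l r hl hlr hr hfuel
    rw [pvLoopA, pvGoB]
    have hlen : (((A.drop l.toNat).take (r + 1 - l).toNat).length : Int) = r + 1 - l := by
      simp only [List.length_take, List.length_drop]
      omega
    by_cases h : l + 1 < r
    · have h2 : ¬ ((((A.drop l.toNat).take (r + 1 - l).toNat).length : Int) ≤ 2) := by omega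
      simp only [h, dite_true, h2, dite_false]
      -- the two midpoints agree: (l + r) // 2 = l + ((n - 1) // 2) with n = r + 1 - l
      have hmid : PySem.Int.floordiv (l + r) 2
          = l + PySem.Int.floordiv ((((A.drop l.toNat).take (r + 1 - l).toNat).length : Int) - 1) 2 := by
        rw [PySem.Int.floordiv_eq_ediv_of_pos (by omega), PySem.Int.floordiv_eq_ediv_of_pos (by omega), hlen]
        omega
      set m := PySem.Int.floordiv ((((A.drop l.toNat).take (r + 1 - l).toNat).length : Int) - 1) 2 with hm
      have hmb : 1 ≤ m ∧ m + 1 < r + 1 - l := by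
        have := pvMBounds (((A.drop l.toNat).take (r + 1 - l).toNat).length : Int) (by omega)
        omega
      -- the two gets agree
      have hget : PySem.List.pyGet? A (PySem.Int.floordiv (l + r) 2)
          = PySem.List.pyGet? ((A.drop l.toNat).take (r + 1 - l).toNat) m := by
        rw [hmid]
        rw [PySem.List.pyGet?_of_nonneg A (i := l + m) (by omega), PySem.List.pyGet?_of_nonneg ((A.drop l.toNat).take (r + 1 - l).toNat) (i := m) (by omega)]
        rw [List.getElem?_take_of_lt (by omega), List.getElem?_drop]
        congr 1
        omega
      rw [hget]
      cases hg : PySem.List.pyGet? ((A.drop l.toNat).take (r + 1 - l).toNat) m with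
      | none =>
        -- impossible: m is in range
        exfalso
        rw [PySem.List.pyGet?_of_nonneg ((A.drop l.toNat).take (r + 1 - l).toNat) (i := m) (by omega)] at hg
        rw [List.getElem?_eq_none_iff] at hg
        omega
      | some v =>
        by_cases he : target = v
        · simp only [he, if_true]
          rw [hmid]
        · simp only [he, if_false]
          by_cases hlt : target < v
          · simp only [hlt, if_true]
            -- left half: window (l, l + m); slice sub[:m+1] = A[l : l+m+1]
            have hsl : PySem.List.slice ((A.drop l.toNat).take (r + 1 - l).toNat) none (some (m + 1))
                = (A.drop l.toNat).take (l + m + 1 - l).toNat := by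
              rw [PySem.List.slice_to ((A.drop l.toNat).take (r + 1 - l).toNat) (by omega)]
              rw [List.take_take]
              congr 1
              omega
            rw [hsl, hmid]
            exact ih l (l + m) (by omega) (by omega) (by omega) (by omega)
          · simp only [hlt, if_false]
            -- right half: window (l + m, r); slice sub[m:] = A[l+m : r+1]
            have hsl : PySem.List.slice ((A.drop l.toNat).take (r + 1 - l).toNat) (some m) none
                = (A.drop (l + m).toNat).take (r + 1 - (l + m)).toNat := by
              rw [PySem.List.slice_from ((A.drop l.toNat).take (r + 1 - l).toNat) (by omega)]
              rw [List.drop_take, List.drop_drop]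
              congr 1
              · omega
              · congr 1
                omega
            rw [hsl, hmid]
            have := ih (l + m) r (by omega) (by omega) (by omega) (by omega)
            rw [this]
            ring
    · have h2 : (((A.drop l.toNat).take (r + 1 - l).toNat).length : Int) ≤ 2 := by omega
      simp only [h, dite_false, h2, dite_true]
      omega

-- ===== VERDICT (by name: the statement is the Claim_ definition above) =====
theorem findUpperClosest_spec : Claim_equal_findUpperClosest := by
  intro A target _
  unfold Spec_findUpperClosest findUpperClosest findUpperClosest_alt
  have h := pvLoop_eq_go A target ((((A.length : Int) - 1) - 0).toNat) 0 ((A.length : Int) - 1)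
    (le_refl _) (by omega) (by omega) (le_refl _)
  rw [h]
  simp
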